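-- pv_equiv track=rewrite | github.com/yeonddori/Algorithm-Study | tbvjgjfzm/2024-03/PGS_LV1_과일-장수.py | solution
-- ===== SOURCE A (Python) =====
-- def solution(k, m, score):
--     s_len = len(score)
--     score.sort(reverse = True)
--     count = s_len // m
--     i = 1
--     answer = 0
--     while i <= count:
--         answer = answer + score[i * m - 1] * m
--         i += 1
--     return answer
-- ===== SOURCE B (Python) =====
-- def solution(k, m, score):
--     # Frequency map instead of sorting all n elements: sort only the distinct
--     # grades descending and count, per run of equal grades, how many box
--     # minima (every m-th fruit from the top) fall inside that run.
--     cnt = {}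
--     for x in score:
--         cnt[x] = cnt.get(x, 0) + 1
--     pos = 0
--     answer = 0
--     for v in sorted(cnt, reverse=True):
--         c = cnt[v]
--         hits = (pos + c) // m - pos // m
--         if hits > 0:
--             answer += v * m * hits
--         pos += c
--     return answer
-- ===== Notes on version B (the rewrite author's own statement) =====
-- stated objective: alternative
-- what changed: B replaces A's full descending sort plus indexed while-loop over every m-th element by a frequency dict: it sorts only the distinct grades descending and, for each run of equal grades, counts arithmetically how many box minima fall inside the run ((pos+c)//m - pos//m), so no full n-element sort and no per-element indexing; B also does not mutate the caller's list.
import Mathlib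
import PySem

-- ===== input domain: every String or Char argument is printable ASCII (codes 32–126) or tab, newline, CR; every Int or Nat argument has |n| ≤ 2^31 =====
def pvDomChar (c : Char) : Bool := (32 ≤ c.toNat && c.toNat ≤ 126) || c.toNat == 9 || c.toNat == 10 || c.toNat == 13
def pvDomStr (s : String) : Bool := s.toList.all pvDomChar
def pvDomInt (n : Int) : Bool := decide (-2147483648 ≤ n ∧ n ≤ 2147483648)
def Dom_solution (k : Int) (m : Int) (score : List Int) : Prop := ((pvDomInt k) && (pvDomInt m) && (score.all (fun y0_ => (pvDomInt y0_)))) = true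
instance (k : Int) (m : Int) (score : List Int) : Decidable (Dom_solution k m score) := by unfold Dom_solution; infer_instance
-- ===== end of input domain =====

-- B replaces A's full descending sort + indexed while-loop by a frequency dict: only the
-- distinct grades are sorted, and per run of equal grades the number of box minima inside the
-- run is computed arithmetically. A sorts `score` in place, B does not mutate it; the
-- equivalence proved here is about the return value.

-- ===== PORT A =====
def solution (k : Int) (m : Int) (score : List Int) : Int :=
  let sLen : Int := (score.length : Int)
  let scoreSorted := PySem.List.sorted score (fun x => x) true
  let count := PySem.Int.floordiv sLen m
  (PySem.List.pyRange 1 (count + 1) 1).foldl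
    (fun answer i => answer + PySem.List.pyGetD scoreSorted (i * m - 1) 0 * m) 0

-- ===== PORT B =====
def solution_alt (k : Int) (m : Int) (score : List Int) : Int :=
  let cnt := score.foldl (fun d x => d.insert x (d.getD x 0 + 1)) (PySem.Dict.empty)
  let res := (PySem.List.sorted cnt.keys (fun x => x) true).foldl
    (fun (st : Int × Int) v =>
      let c := cnt.getD v 0
      let hits := PySem.Int.floordiv (st.1 + c) m - PySem.Int.floordiv st.1 m
      (st.1 + c, if 0 < hits then st.2 + v * m * hits else st.2))
    (0, 0)
  res.2

-- ===== PRECONDITION & SPEC =====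
-- Pre_ excludes only m = 0, where A raises ZeroDivisionError at `s_len // m`.
def Pre_solution (k : Int) (m : Int) (score : List Int) : Prop := m ≠ 0
instance (k : Int) (m : Int) (score : List Int) : Decidable (Pre_solution k m score) := by unfold Pre_solution; infer_instance
def pvWitness_solution : Int × Int × List Int := (4, 3, [1, 2, 3, 1, 2, 3, 1])

def Spec_solution (k : Int) (m : Int) (score : List Int) (out : Int) : Prop := out = solution_alt k m score
instance (k : Int) (m : Int) (score : List Int) (out : Int) : Decidable (Spec_solution k m score out) := by unfold Spec_solution; infer_instance

-- ===== CLAIM (what is proved, stated in full; the proofs are below) =====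
def Claim_equal_solution : Prop := ∀ (k : Int) (m : Int) (score : List Int), Dom_solution k m score → Pre_solution k m score → Spec_solution k m score (solution k m score)

-- ===== LEMMAS AND PROOFS =====


lemma run_getD (pre rest : List Int) (c : Nat) (v : Int) (i : Nat)
    (h1 : pre.length ≤ i) (h2 : i < pre.length + c) :
    (pre ++ (List.replicate c v ++ rest)).getD i 0 = v := by
  have hlt : i < (pre ++ (List.replicate c v ++ rest)).length := by
    simp [List.length_append, List.length_replicate]; omega
  rw [List.getD_eq_getElem _ _ hlt, List.getElem_append_right (by omega),
    List.getElem_append_left (by simp [List.length_replicate]; omega), List.getElem_replicate]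

lemma fold_inv (M : Nat) (hM : 0 < M) (f : Int → Nat) :
    ∀ (ks : List Int) (pre : List Int) (acc : Int),
    (ks.foldl (fun (st : Int × Int) v =>
        (st.1 + (f v : Int),
         if 0 < PySem.Int.floordiv (st.1 + (f v : Int)) (M : Int) - PySem.Int.floordiv st.1 (M : Int)
         then st.2 + v * (M : Int) * (PySem.Int.floordiv (st.1 + (f v : Int)) (M : Int) - PySem.Int.floordiv st.1 (M : Int))
         else st.2)) ((pre.length : Int), acc)).2
      = acc + ∑ x ∈ Finset.Ico (pre.length / M)
            ((pre.length + (ks.flatMap (fun v => List.replicate (f v) v)).length) / M),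
          (pre ++ ks.flatMap (fun v => List.replicate (f v) v)).getD ((1 + x) * M - 1) 0 * (M : Int) := by
  intro ks
  induction ks with
  | nil => intro pre acc; simp
  | cons v ks ih =>
    intro pre acc
    have hble : pre.length / M ≤ (pre.length + f v) / M := Nat.div_le_div_right (Nat.le_add_right _ _)
    have hfd1 : PySem.Int.floordiv ((pre.length : Int) + (f v : Int)) (M : Int) = (((pre.length + f v) / M : Nat) : Int) := by
      rw [(by push_cast; ring : (pre.length : Int) + (f v : Int) = ((pre.length + f v : Nat) : Int))]
      exact PySem.Int.floordiv_natCast _ _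
    have hfd0 : PySem.Int.floordiv (pre.length : Int) (M : Int) = ((pre.length / M : Nat) : Int) :=
      PySem.Int.floordiv_natCast _ _
    have hacc : (if 0 < PySem.Int.floordiv ((pre.length : Int) + (f v : Int)) (M : Int) - PySem.Int.floordiv (pre.length : Int) (M : Int)
         then acc + v * (M : Int) * (PySem.Int.floordiv ((pre.length : Int) + (f v : Int)) (M : Int) - PySem.Int.floordiv (pre.length : Int) (M : Int))
         else acc)
        = acc + v * (M : Int) * (((pre.length + f v) / M - pre.length / M : Nat) : Int) := by
      rw [hfd1, hfd0]
      by_cases h0 : 0 < (pre.length + f v) / M - pre.length / M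
      · rw [if_pos (by omega)]
        rw [Nat.cast_sub hble]
      · rw [if_neg (by omega)]
        have h1 : (pre.length + f v) / M - pre.length / M = 0 := by omega
        rw [h1]
        simp
    have hlen' : ((pre.length : Int) + (f v : Int)) = (((pre ++ List.replicate (f v) v).length : Nat) : Int) := by
      rw [List.length_append, List.length_replicate]; push_cast; ring
    simp only [List.foldl_cons]
    rw [hacc, hlen', ih]
    -- align the two descriptions of the concatenated list
    have hflat : (v :: ks).flatMap (fun w => List.replicate (f w) w)
        = List.replicate (f v) v ++ ks.flatMap (fun w => List.replicate (f w) w) := by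
      simp
    have hdesc : (pre ++ List.replicate (f v) v) ++ ks.flatMap (fun w => List.replicate (f w) w)
        = pre ++ (v :: ks).flatMap (fun w => List.replicate (f w) w) := by
      rw [hflat, List.append_assoc]
    have hlen2 : (pre ++ List.replicate (f v) v).length = pre.length + f v := by
      simp [List.length_append, List.length_replicate]
    have hlen3 : pre.length + ((v :: ks).flatMap (fun w => List.replicate (f w) w)).length
        = pre.length + f v + (ks.flatMap (fun w => List.replicate (f w) w)).length := by
      rw [hflat, List.length_append, List.length_replicate]; omega
    rw [hdesc, hlen2, hlen3]
    set desc := pre ++ (v :: ks).flatMap (fun w => List.replicate (f w) w) with hdescdef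
    set g := fun x : Nat => desc.getD ((1 + x) * M - 1) 0 * (M : Int) with hg
    have htle : (pre.length + f v) / M ≤ (pre.length + f v + (ks.flatMap (fun w => List.replicate (f w) w)).length) / M := Nat.div_le_div_right (Nat.le_add_right _ _)
    have hrun : ∀ x ∈ Finset.Ico (pre.length / M) ((pre.length + f v) / M), g x = v * (M : Int) := by
      intro x hx
      rw [Finset.mem_Ico] at hx
      have e1 := Nat.div_add_mod pre.length M
      have e2 := Nat.mod_lt pre.length hM
      have e3 := Nat.div_add_mod (pre.length + f v) M
      have pm1 : M * (pre.length / M) ≤ M * x := Nat.mul_le_mul_left M hx.1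
      have pm2 : M * (x + 1) ≤ M * ((pre.length + f v) / M) := Nat.mul_le_mul_left M (by omega)
      have h4 : (1 + x) * M = M * x + M := by ring
      have h5 : M * (x + 1) = M * x + M := by ring
      have hlow : pre.length ≤ (1 + x) * M - 1 := by omega
      have hhigh : (1 + x) * M - 1 < pre.length + f v := by omega
      have hget := run_getD pre (ks.flatMap (fun w => List.replicate (f w) w)) (f v) v ((1 + x) * M - 1)
        hlow hhigh
      rw [hg]
      simp only [hdescdef, hflat]
      rw [hget]
    have hsum1 : ∑ x ∈ Finset.Ico (pre.length / M) ((pre.length + f v) / M), g x = (((pre.length + f v) / M - pre.length / M : Nat) : Int) * (v * (M : Int)) := by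
      rw [Finset.sum_congr rfl hrun, Finset.sum_const, Nat.card_Ico, nsmul_eq_mul]
    rw [← Finset.sum_Ico_consecutive g hble htle, hsum1]
    push_cast [Nat.cast_sub hble]
    ring


lemma floordiv_antitone_neg (m a b : Int) (hm : m < 0) (hab : a ≤ b) :
    PySem.Int.floordiv b m ≤ PySem.Int.floordiv a m := by
  have ha := PySem.Int.floordiv_mul_add_mod a m
  have hb := PySem.Int.floordiv_mul_add_mod b m
  have hra := PySem.Int.mod_neg_bounds a hm
  have hrb := PySem.Int.mod_neg_bounds b hm
  by_contra h
  rw [not_le] at h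
  have h1 : PySem.Int.floordiv a m + 1 ≤ PySem.Int.floordiv b m := by omega
  have h2 : PySem.Int.floordiv b m * m ≤ (PySem.Int.floordiv a m + 1) * m :=
    mul_le_mul_of_nonpos_right h1 hm.le
  nlinarith

lemma fold_neg (m : Int) (hm : m < 0) (f : Int → Nat) :
    ∀ (ks : List Int) (p : Int),
    (ks.foldl (fun (st : Int × Int) v =>
        (st.1 + (f v : Int),
         if 0 < PySem.Int.floordiv (st.1 + (f v : Int)) m - PySem.Int.floordiv st.1 m
         then st.2 + v * m * (PySem.Int.floordiv (st.1 + (f v : Int)) m - PySem.Int.floordiv st.1 m)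
         else st.2)) (p, 0)).2 = 0 := by
  intro ks
  induction ks with
  | nil => intro p; rfl
  | cons v ks ih =>
    intro p
    have hle : PySem.Int.floordiv (p + (f v : Int)) m ≤ PySem.Int.floordiv p m :=
      floordiv_antitone_neg m p (p + (f v : Int)) hm (by simp)
    simp only [List.foldl_cons, if_neg (by omega : ¬ 0 < PySem.Int.floordiv (p + (f v : Int)) m - PySem.Int.floordiv p m)]
    exact ih (p + (f v : Int))


lemma sum_ite_count (w : Int) (n : Int → Nat) :
    ∀ K : List Int, K.Nodup →
      (K.map fun v => (List.replicate (n v) v).count w).sum = if w ∈ K then n w else 0 := by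
  intro K
  induction K with
  | nil => intro _; simp
  | cons v K ih =>
    intro hnd
    rw [List.nodup_cons] at hnd
    rw [List.map_cons, List.sum_cons, ih hnd.2, List.count_replicate]
    by_cases hwv : w = v
    · subst hwv
      simp [hnd.1]
    · simp [List.mem_cons, hwv]
      intro h
      exact absurd h.symm hwv

lemma flat_perm (xs : List Int) :
    ((PySem.List.sorted (PySem.Set.ofList xs) (fun x => x) false).flatMap
        (fun v => List.replicate (xs.count v) v)).Perm xs := by
  set K := PySem.List.sorted (PySem.Set.ofList xs) (fun x => x) false with hK
  have hperm : K.Perm (PySem.Set.ofList xs) := PySem.List.sorted_perm _ _ _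
  have hnd : K.Nodup := hperm.nodup_iff.mpr (PySem.Set.nodup_ofList xs)
  have hmem : ∀ w : Int, w ∈ K ↔ w ∈ xs := by
    intro w
    rw [hperm.mem_iff, PySem.Set.mem_ofList]
  rw [List.perm_iff_count]
  intro w
  rw [List.count_flatMap]
  have := sum_ite_count w (fun v => xs.count v) K hnd
  simp only [Function.comp_def]
  rw [this]
  by_cases hw : w ∈ xs
  · rw [if_pos ((hmem w).mpr hw)]
  · rw [if_neg (fun h => hw ((hmem w).mp h)), List.count_eq_zero_of_not_mem hw]

lemma asc_flat (xs : List Int) :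
    PySem.List.sorted xs (fun x => x) false
      = (PySem.List.sorted (PySem.Set.ofList xs) (fun x => x) false).flatMap
          (fun v => List.replicate (xs.count v) v) := by
  have hp : ((PySem.List.sorted (PySem.Set.ofList xs) (fun x => x) false).flatMap
      (fun v => List.replicate (xs.count v) v)).Pairwise (· ≤ ·) := by
    rw [List.pairwise_flatMap]
    constructor
    · intro a _
      exact List.pairwise_replicate.mpr (Or.inr le_rfl)
    · have hlt := PySem.List.sorted_ofList_pairwise_lt xs
      refine hlt.imp_of_mem ?_
      intro a b _ _ hab x hx y hy
      rw [List.eq_of_mem_replicate hx, List.eq_of_mem_replicate hy]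
      exact le_of_lt hab
  exact PySem.List.sorted_id_eq_of_perm_of_pairwise _ _ (flat_perm xs) hp

lemma sorted_rev_eq_reverse (xs : List Int) :
    PySem.List.sorted xs (fun x => x) true = (PySem.List.sorted xs (fun x => x)).reverse := by
  rw [← List.reverse_reverse (PySem.List.sorted xs (fun x => x) true)]
  congr 1
  apply PySem.List.eq_of_perm_of_pairwise_le_of_injective (fun x : Int => x) (fun a b h => h)
  · exact ((List.reverse_perm _).trans (PySem.List.sorted_perm xs (fun x => x) true)).trans
      (PySem.List.sorted_perm xs (fun x => x) false).symm
  · rw [List.pairwise_reverse]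
    exact PySem.List.sorted_pairwise_rev xs _
  · exact PySem.List.sorted_pairwise xs _

lemma desc_flat (xs : List Int) :
    PySem.List.sorted xs (fun x => x) true
      = (PySem.List.sorted (PySem.Set.ofList xs) (fun x => x) true).flatMap
          (fun v => List.replicate (xs.count v) v) := by
  rw [sorted_rev_eq_reverse, sorted_rev_eq_reverse, asc_flat, List.reverse_flatMap]
  simp [Function.comp_def]

lemma A_char (k : Int) (M : Nat) (hM : 0 < M) (score : List Int) :
    solution k (M : Int) score
      = ∑ x ∈ Finset.range (score.length / M),
          (PySem.List.sorted score (fun x => x) true).getD ((1 + x) * M - 1) 0 * (M : Int) := by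
  simp only [solution]
  rw [PySem.Int.floordiv_natCast, PySem.List.foldl_add, PySem.List.pyRange_one, List.map_map,
    zero_add]
  have h1 : ((((score.length / M : Nat) : Int) + 1 - 1)).toNat = score.length / M := by
    rw [add_sub_cancel_right, Int.toNat_natCast]
  rw [h1]
  show ∑ x ∈ Finset.range (score.length / M), _ = _
  refine Finset.sum_congr rfl ?_
  intro x _
  simp only [Function.comp]
  have h2 : (1 ≤ (1 + x) * M) := Nat.le_mul_of_pos_right _ hM |>.trans' (by omega)
  have h3 : (1 + (x : Int)) * (M : Int) - 1 = (((1 + x) * M - 1 : Nat) : Int) := by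
    push_cast [Nat.cast_sub h2]
    ring
  rw [h3, PySem.List.pyGetD_natCast]

lemma B_char (k : Int) (M : Nat) (hM : 0 < M) (score : List Int) :
    solution_alt k (M : Int) score
      = ∑ x ∈ Finset.range (score.length / M),
          (PySem.List.sorted score (fun x => x) true).getD ((1 + x) * M - 1) 0 * (M : Int) := by
  simp only [solution_alt, PySem.Dict.foldl_insert_getD_add_one_eq_counter,
    PySem.Dict.getD_counter, PySem.Dict.keys_counter]
  have hinv := fold_inv M hM (fun v => score.count v)
    (PySem.List.sorted (PySem.Set.ofList score) (fun x => x) true) [] 0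
  simp only [List.length_nil, Nat.cast_zero, List.nil_append, Nat.zero_div, zero_add] at hinv
  rw [hinv, ← desc_flat, PySem.List.length_sorted, Finset.range_eq_Ico]

lemma solution_eq_alt (k m : Int) (score : List Int) (hpre : m ≠ 0) :
    solution k m score = solution_alt k m score := by
  rcases lt_trichotomy m 0 with hm | hm | hm
  · have hA : solution k m score = 0 := by
      have hc : PySem.Int.floordiv (score.length : Int) m ≤ 0 := by
        by_contra hpos
        rw [not_le] at hpos
        have h1 := PySem.Int.floordiv_mul_add_mod (score.length : Int) m
        have h2 := PySem.Int.mod_neg_bounds (score.length : Int) hm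
        nlinarith [Int.natCast_nonneg score.length]
      simp only [solution]
      rw [PySem.List.pyRange_one_eq_nil (by omega)]
      rfl
    have hB : solution_alt k m score = 0 := by
      simp only [solution_alt, PySem.Dict.foldl_insert_getD_add_one_eq_counter,
        PySem.Dict.getD_counter, PySem.Dict.keys_counter]
      exact fold_neg m hm (fun v => score.count v)
        (PySem.List.sorted (PySem.Set.ofList score) (fun x => x) true) 0
    rw [hA, hB]
  · exact absurd hm hpre
  · obtain ⟨M, rfl⟩ : ∃ M : Nat, m = (M : Int) := ⟨m.toNat, (Int.toNat_of_nonneg hm.le).symm⟩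
    have hM : 0 < M := by exact_mod_cast hm
    rw [A_char k M hM score, B_char k M hM score]

-- ===== VERDICT (by name: the statement is the Claim_ definition above) =====
theorem solution_spec : Claim_equal_solution := by
  intro k m score _ hpre
  unfold Spec_solution
  exact solution_eq_alt k m score hpre
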